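-- pv_equiv track=rewrite | github.com/DikshyaLimbu/TechSkillSync | backend/resume_skill_extraction/word_pdf_skill_extractor.py | find_skill_section
-- ===== SOURCE A (Python) =====
-- def find_skill_section(lines):
--     max_lines = 15
--     skills_text = []
--     capture_skills_section =False
--     for line in lines:
--         if "skills" in line.lower():
--             capture_skills_section = True
--
--         if capture_skills_section:
--             skills_text.append(line)
--
--         if len(skills_text) > max_lines:
--             break
--
--     text = "\n".join(skills_text)
--     return text
-- ===== SOURCE B (Python) =====
-- def find_skill_section(lines):
--     lines = list(lines)
--     idx = next((i for i, l in enumerate(lines) if "skills" in l.lower()), None)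
--     if idx is None:
--         return ""
--     return "\n".join(lines[idx:idx + 16])
-- ===== Notes on version B (the rewrite author's own statement) =====
-- stated objective: simpler
-- what changed: Replaces the streaming flag+accumulator loop with a find-first-boundary (next/enumerate) followed by a single slice lines[idx:idx+16] and one join.
import Mathlib
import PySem

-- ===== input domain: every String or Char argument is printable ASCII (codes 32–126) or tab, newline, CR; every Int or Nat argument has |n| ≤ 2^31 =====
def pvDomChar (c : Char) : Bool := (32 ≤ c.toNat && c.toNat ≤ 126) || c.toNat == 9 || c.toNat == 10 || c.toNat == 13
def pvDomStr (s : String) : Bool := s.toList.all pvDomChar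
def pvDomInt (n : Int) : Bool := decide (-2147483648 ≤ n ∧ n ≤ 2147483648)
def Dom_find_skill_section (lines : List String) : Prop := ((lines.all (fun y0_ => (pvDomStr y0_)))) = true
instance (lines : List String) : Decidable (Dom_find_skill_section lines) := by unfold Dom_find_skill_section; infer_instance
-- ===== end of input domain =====

-- B replaces A's streaming flag+accumulator loop by find-first-matching-line then a slice and one join (simpler decomposition).


-- ===== PORT A =====
-- the for-loop with 'break': state = (skills_text, capture_skills_section)
def findA_go : List String → List String → Bool → String
  | [], acc, _ => PySem.Str.join "\n" acc
  | l :: rest, acc, cap =>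
    let cap' := cap || PySem.Str.isIn "skills" (PySem.Str.lower l)
    let acc' := if cap' then acc ++ [l] else acc
    if acc'.length > 15 then PySem.Str.join "\n" acc'
    else findA_go rest acc' cap'

def find_skill_section (lines : List String) : String :=
  findA_go lines [] false

-- ===== PORT B =====
def find_skill_section_alt (lines : List String) : String :=
  match lines.findIdx? (fun l => PySem.Str.isIn "skills" (PySem.Str.lower l)) with
  | none => ""
  | some i => PySem.Str.join "\n" (PySem.List.slice lines (some (i : Int)) (some ((i : Int) + 16)))

-- ===== PRECONDITION & SPEC =====
def Spec_find_skill_section (lines : List String) (out : String) : Prop := out = find_skill_section_alt lines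
instance (lines : List String) (out : String) : Decidable (Spec_find_skill_section lines out) := by unfold Spec_find_skill_section; infer_instance

-- ===== CLAIM (what is proved, stated in full; the proofs are below) =====
def Claim_equal_find_skill_section : Prop := ∀ (lines : List String), Dom_find_skill_section lines → Spec_find_skill_section lines (find_skill_section lines)

-- ===== LEMMAS AND PROOFS =====

-- once the flag is set, A just appends lines until 16 are collected
theorem findA_go_true (rest : List String) : ∀ (acc : List String), acc.length ≤ 15 →
    findA_go rest acc true = PySem.Str.join "\n" (acc ++ rest.take (16 - acc.length)) := by
  induction rest with
  | nil => intro acc _; simp [findA_go]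
  | cons l rest ih =>
    intro acc hle
    simp only [findA_go, Bool.true_or]
    simp only [if_true]
    by_cases h : acc.length = 15
    · rw [if_pos (by simp [h])]
      have : 16 - acc.length = 1 := by omega
      simp [this, List.take_succ_cons]
    · rw [if_neg (by simp; omega)]
      rw [ih (acc ++ [l]) (by simp; omega)]
      have h16 : 16 - acc.length = (16 - (acc ++ [l]).length) + 1 := by simp; omega
      rw [h16, List.take_succ_cons]
      simp

theorem findA_go_main (lines : List String) :
    findA_go lines [] false =
      match lines.findIdx? (fun l => PySem.Str.isIn "skills" (PySem.Str.lower l)) with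
      | none => PySem.Str.join "\n" []
      | some i => PySem.Str.join "\n" ((lines.drop i).take 16) := by
  induction lines with
  | nil => simp [findA_go]
  | cons l rest ih =>
    simp only [findA_go, Bool.false_or, List.findIdx?_cons]
    by_cases h : PySem.Str.isIn "skills" (PySem.Str.lower l) = true
    · simp only [h, if_true]
      rw [if_neg (by simp)]
      rw [show ([] : List String) ++ [l] = [l] by rfl, findA_go_true rest [l] (by simp)]
      simp [List.take_succ_cons]
    · have hb : PySem.Str.isIn "skills" (PySem.Str.lower l) = false := by
        simpa using h
      have hc : PySem.Chars.isIn ['s', 'k', 'i', 'l', 'l', 's'] (PySem.Chars.lower l.toList) = false := by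
        simpa [PySem.Str.isIn, PySem.Str.lower] using hb
      rw [if_neg (by simp [hc]), if_neg (by simp [hc])]
      simp only [hb]
      rw [ih]
      cases hf : rest.findIdx? (fun l => PySem.Str.isIn "skills" (PySem.Str.lower l)) with
      | none => simp
      | some i => simp

-- ===== VERDICT (by name: the statement is the Claim_ definition above) =====
theorem find_skill_section_spec : Claim_equal_find_skill_section := by
  intro lines _
  unfold Spec_find_skill_section find_skill_section find_skill_section_alt
  rw [findA_go_main]
  cases hf : lines.findIdx? (fun l => PySem.Str.isIn "skills" (PySem.Str.lower l)) with
  | none => simp [PySem.Str.join]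
  | some i =>
    simp only
    rw [show ((i : Int) + 16) = ((i : Int) + ((16 : Nat) : Int)) by norm_num,
      PySem.List.slice_natCast_add]
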